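-- pv_equiv track=rewrite | github.com/alimohammad0816/challenges | none_divisible.py | none_devisible_calculator
-- ===== SOURCE A (Python) =====
-- from itertools import chain, combinations
--
-- def subset_creator(array):
--     subsets = []
--     for i in range(len(array)+1):
--         subsets.append(list(combinations(array, i)))
--     subsets = list(chain.from_iterable(subsets))
--     return subsets
--
-- def none_devisible_calculator(array, k):
--     division = False
--     subset = subset_creator(array)
--     for i in range(len(subset)):
--         if len(subset[i]) > 1:
--             x = subset[i]
--             x_subsets = list(combinations(x, 2))
--             for l in x_subsets:
--                 if sum(l) % k == 0:
--                     division = True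
--                     break
--             if division:
--                 division = False
--                 continue
--             else:
--                 yield x
-- ===== SOURCE B (Python) =====
-- from itertools import combinations
--
-- def none_devisible_calculator(array, k):
--     # Generate candidate subsets directly by size (2..n); test each via its
--     # residue multiset instead of scanning all pairs.
--     for size in range(2, len(array) + 1):
--         for x in combinations(array, size):
--             rs = [v % k for v in x]
--             for r in rs:
--                 s = (-r) % k
--                 if (s == r and rs.count(r) >= 2) or (s != r and s in rs):
--                     break
--             else:
--                 yield x
-- ===== Notes on version B (the rewrite author's own statement) =====
-- stated objective: alternative
-- what changed: B enumerates candidate subsets of size >= 2 directly (never building and re-filtering the full powerset list) and rejects a subset by a residue-multiset clash test (residue r against (-r)%k) instead of scanning all pairs of the subset.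
import Mathlib
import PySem

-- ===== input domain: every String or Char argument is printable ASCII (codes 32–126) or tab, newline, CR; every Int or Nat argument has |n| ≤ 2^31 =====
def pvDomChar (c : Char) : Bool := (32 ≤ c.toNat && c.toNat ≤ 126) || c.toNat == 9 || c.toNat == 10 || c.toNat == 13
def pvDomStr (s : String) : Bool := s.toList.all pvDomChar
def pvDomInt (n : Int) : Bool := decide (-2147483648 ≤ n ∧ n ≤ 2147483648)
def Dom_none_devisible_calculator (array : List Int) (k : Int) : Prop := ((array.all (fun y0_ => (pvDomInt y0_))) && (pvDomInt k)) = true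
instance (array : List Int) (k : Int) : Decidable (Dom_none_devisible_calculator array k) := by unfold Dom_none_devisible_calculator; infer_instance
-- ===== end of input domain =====

-- B streams subsets of size ≥ 2 and rejects by a residue-multiset clash test instead of
-- materialising the powerset and scanning all pairs of each subset (objective: alternative).

-- ===== PORT A =====

-- itertools.combinations(l, n) in Python's order (shared by both ports, both call it)
def pvCombos : Nat → List Int → List (List Int)
  | 0, _ => [[]]
  | _ + 1, [] => []
  | n + 1, a :: as => (pvCombos n as).map (fun t => a :: t) ++ pvCombos (n + 1) as

-- subset_creator: all combinations of every size 0..len, chained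
def pvSubsetCreator (array : List Int) : List (List Int) :=
  ((List.range (array.length + 1)).map (fun i => pvCombos i array)).flatten

-- the generator loop of A: index scan with the `division` flag (flag is reset each
-- iteration, so the recursion carries no extra state)
def pvLoopA (k : Int) : List (List Int) → List (List Int)
  | [] => []
  | x :: rest =>
    if 1 < x.length then
      if (pvCombos 2 x).any (fun l => PySem.Int.mod l.sum k == 0) then
        pvLoopA k rest
      else
        x :: pvLoopA k rest
    else pvLoopA k rest

def none_devisible_calculator (array : List Int) (k : Int) : List (List Int) :=
  pvLoopA k (pvSubsetCreator array)

-- ===== PORT B =====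

-- B's inner test: residue r is bad if it clashes with s = (-r) % k in the residue list
def pvBadRes (k : Int) (rs : List Int) (r : Int) : Bool :=
  let s := PySem.Int.mod (-r) k
  (s == r && decide (2 ≤ rs.count r)) || (s != r && rs.contains s)

def none_devisible_calculator_alt (array : List Int) (k : Int) : List (List Int) :=
  (List.range' 2 (array.length - 1)).flatMap (fun size =>
    (pvCombos size array).filter (fun x =>
      let rs := x.map (fun v => PySem.Int.mod v k)
      rs.all (fun r => !pvBadRes k rs r)))

-- ===== PRECONDITION & SPEC =====
-- Pre_ excludes exactly the inputs on which A raises ZeroDivisionError: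
-- k = 0 with at least two elements (some pair sum is then reduced mod 0).
def Pre_none_devisible_calculator (array : List Int) (k : Int) : Prop :=
  k ≠ 0 ∨ array.length ≤ 1
instance (array : List Int) (k : Int) : Decidable (Pre_none_devisible_calculator array k) := by
  unfold Pre_none_devisible_calculator; infer_instance

def pvWitness_none_devisible_calculator : List Int × Int := ([1, 2, 4], 4)

def Spec_none_devisible_calculator (array : List Int) (k : Int) (out : List (List Int)) : Prop := out = none_devisible_calculator_alt array k
instance (array : List Int) (k : Int) (out : List (List Int)) : Decidable (Spec_none_devisible_calculator array k out) := by unfold Spec_none_devisible_calculator; infer_instance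

-- ===== CLAIM (what is proved, stated in full; the proofs are below) =====
def Claim_equal_none_devisible_calculator : Prop := ∀ (array : List Int) (k : Int), Dom_none_devisible_calculator array k → Pre_none_devisible_calculator array k → Spec_none_devisible_calculator array k (none_devisible_calculator array k)

-- ===== LEMMAS AND PROOFS =====

-- every member of pvCombos n l has length n
theorem pvCombos_length {n : Nat} {l x : List Int} (h : x ∈ pvCombos n l) : x.length = n := by
  induction l generalizing n x with
  | nil => cases n with
    | zero => simp [pvCombos] at h; simp [h]
    | succ m => simp [pvCombos] at h
  | cons a as ih => cases n with
    | zero => simp [pvCombos] at h; simp [h]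
    | succ m =>
      simp only [pvCombos, List.mem_append, List.mem_map] at h
      rcases h with ⟨t, ht, rfl⟩ | h
      · simp [ih ht]
      · exact ih h

-- membership characterisation: combinations are exactly the sublists of the given length
theorem pvCombos_mem {n : Nat} {l x : List Int} :
    x ∈ pvCombos n l ↔ x.Sublist l ∧ x.length = n := by
  induction l generalizing n x with
  | nil =>
    cases n with
    | zero =>
      simp only [pvCombos, List.mem_singleton]
      constructor
      · rintro rfl; exact ⟨List.Sublist.refl _, rfl⟩
      · rintro ⟨_, hl⟩; exact List.length_eq_zero_iff.mp hl
    | succ m =>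
      simp only [pvCombos, List.not_mem_nil, false_iff, not_and]
      intro h
      rw [List.sublist_nil.mp h]
      simp
  | cons a as ih =>
    cases n with
    | zero =>
      simp only [pvCombos, List.mem_singleton]
      constructor
      · rintro rfl; exact ⟨List.nil_sublist _, rfl⟩
      · rintro ⟨_, hl⟩; exact List.length_eq_zero_iff.mp hl
    | succ m =>
      simp only [pvCombos, List.mem_append, List.mem_map]
      constructor
      · rintro (⟨t, ht, rfl⟩ | h)
        · rcases ih.mp ht with ⟨hs, hl⟩
          exact ⟨List.Sublist.cons₂ a hs, by simp [hl]⟩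
        · rcases ih.mp h with ⟨hs, hl⟩
          exact ⟨hs.cons a, hl⟩
      · rintro ⟨hs, hl⟩
        rcases List.sublist_cons_iff.mp hs with h | ⟨r, rfl, hr⟩
        · right; exact ih.mpr ⟨h, hl⟩
        · left; exact ⟨r, ih.mpr ⟨hr, by simpa using hl⟩, rfl⟩

-- A's flag loop is a filter
theorem pvLoopA_eq_filter (k : Int) (l : List (List Int)) :
    pvLoopA k l = l.filter (fun x =>
      decide (1 < x.length) && !((pvCombos 2 x).any (fun p => PySem.Int.mod p.sum k == 0))) := by
  induction l with
  | nil => rfl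
  | cons x rest ih =>
    by_cases h1 : 1 < x.length
    · by_cases h2 : (pvCombos 2 x).any (fun p => PySem.Int.mod p.sum k == 0)
      · simp [pvLoopA, h1, h2, ih, List.filter_cons]
      · simp only [Bool.not_eq_true] at h2
        simp [pvLoopA, h1, h2, ih, List.filter_cons]
    · simp [pvLoopA, h1, ih, List.filter_cons]

-- modular facts about Python's % (sign of the divisor)
theorem pvMod_sub_dvd (a k : Int) : k ∣ (a - PySem.Int.mod a k) := by
  have h := PySem.Int.floordiv_mul_add_mod a k
  exact ⟨PySem.Int.floordiv a k, by linarith⟩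

theorem pvMod_eq_iff_dvd {k : Int} (hk : k ≠ 0) (a b : Int) :
    PySem.Int.mod a k = PySem.Int.mod b k ↔ k ∣ (a - b) := by
  constructor
  · intro h
    have ha := pvMod_sub_dvd a k
    have hb := pvMod_sub_dvd b k
    have : a - b = (a - PySem.Int.mod a k) - (b - PySem.Int.mod b k) := by rw [h]; ring
    rw [this]; exact dvd_sub ha hb
  · intro h
    have ha := pvMod_sub_dvd a k
    have hb := pvMod_sub_dvd b k
    have hd : k ∣ (PySem.Int.mod a k - PySem.Int.mod b k) := by
      have : PySem.Int.mod a k - PySem.Int.mod b k = (a - PySem.Int.mod a k) * (-1) + (b - PySem.Int.mod b k) + (a - b) := by ring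
      rw [this]
      exact dvd_add (dvd_add (Dvd.dvd.mul_right ha _) hb) h
    have habs : |PySem.Int.mod a k - PySem.Int.mod b k| < |k| := by
      rcases lt_or_gt_of_ne hk with hneg | hpos
      · have b1 := PySem.Int.mod_neg_bounds a hneg
        have b2 := PySem.Int.mod_neg_bounds b hneg
        rw [abs_of_neg hneg] at *
        rw [abs_lt]; omega
      · have a1 := PySem.Int.mod_nonneg a hpos
        have a2 := PySem.Int.mod_lt a hpos
        have b1 := PySem.Int.mod_nonneg b hpos
        have b2 := PySem.Int.mod_lt b hpos
        rw [abs_of_pos hpos]; rw [abs_lt]; omega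
    have := Int.eq_zero_of_abs_lt_dvd ((abs_dvd _ _).mpr hd) habs
    omega

-- two elements with the same image f r, counted twice, yield an ordered pair
theorem pvPair_of_count {f : Int → Int} {x : List Int} {r : Int}
    (h : 2 ≤ (x.map f).count r) :
    ∃ a b, ([a, b] : List Int).Sublist x ∧ f a = r ∧ f b = r := by
  induction x with
  | nil => simp at h
  | cons v vs ih =>
    by_cases hv : f v = r
    · have h1 : 1 ≤ (vs.map f).count r := by
        rw [List.map_cons, hv, List.count_cons_self] at h; omega
      have hr : r ∈ vs.map f := by
        exact List.count_pos_iff.mp (by omega)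
      rcases List.mem_map.mp hr with ⟨b, hb, hfb⟩
      exact ⟨v, b, List.Sublist.cons₂ v (List.singleton_sublist.mpr hb), hv, hfb⟩
    · have h' : 2 ≤ (vs.map f).count r := by
        rw [List.map_cons, List.count_cons_of_ne hv] at h; exact h
      rcases ih h' with ⟨a, b, hs, ha, hb⟩
      exact ⟨a, b, hs.cons v, ha, hb⟩

-- two elements with different images yield an ordered pair (in one of the two orders)
theorem pvPair_of_two {f : Int → Int} {x : List Int} {a b : Int}
    (ha : a ∈ x) (hb : b ∈ x) (hne : f a ≠ f b) :
    ∃ u v, ([u, v] : List Int).Sublist x ∧ u + v = a + b ∧ f u = f a ∧ f v = f b ∨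
           ([u, v] : List Int).Sublist x ∧ u + v = a + b ∧ f u = f b ∧ f v = f a := by
  induction x with
  | nil => simp at ha
  | cons w ws ih =>
    rcases List.mem_cons.mp ha with rfl | ha'
    · have hb' : b ∈ ws := by
        rcases List.mem_cons.mp hb with rfl | h
        · exact absurd rfl hne
        · exact h
      exact ⟨a, b, Or.inl ⟨List.Sublist.cons₂ a (List.singleton_sublist.mpr hb'), rfl, rfl, rfl⟩⟩
    · rcases List.mem_cons.mp hb with rfl | hb'
      · exact ⟨b, a, Or.inr ⟨List.Sublist.cons₂ b (List.singleton_sublist.mpr ha'), by ring, rfl, rfl⟩⟩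
      · rcases ih ha' hb' with ⟨u, v, h⟩
        rcases h with ⟨hs, h2⟩ | ⟨hs, h2⟩
        · exact ⟨u, v, Or.inl ⟨hs.cons w, h2⟩⟩
        · exact ⟨u, v, Or.inr ⟨hs.cons w, h2⟩⟩

-- congruent residues make the pair sum divisible
theorem pvDvd_of_res {k a b r : Int} (hk : k ≠ 0)
    (ha : PySem.Int.mod a k = r) (hb : PySem.Int.mod b k = PySem.Int.mod (-r) k) :
    k ∣ (a + b) := by
  have h1 : PySem.Int.mod (-a) k = PySem.Int.mod (-r) k := by
    rw [pvMod_eq_iff_dvd hk]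
    have : -a - -r = -(a - PySem.Int.mod a k) := by rw [ha]; ring
    rw [this]; exact dvd_neg.mpr (pvMod_sub_dvd a k)
  have h2 := (pvMod_eq_iff_dvd hk b (-a)).mp (by rw [hb, h1])
  simpa [sub_neg_eq_add, add_comm] using h2

-- the heart: A's pair scan fires iff B's residue test fires (k ≠ 0)
theorem pvAny_iff (k : Int) (hk : k ≠ 0) (x : List Int) :
    ((pvCombos 2 x).any (fun p => PySem.Int.mod p.sum k == 0)) =
    ((x.map (fun v => PySem.Int.mod v k)).any
      (fun r => pvBadRes k (x.map (fun v => PySem.Int.mod v k)) r)) := by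
  set f : Int → Int := fun v => PySem.Int.mod v k with hf
  set rs := x.map f with hrs
  rw [Bool.eq_iff_iff]
  simp only [List.any_eq_true]
  constructor
  · rintro ⟨p, hp, hps⟩
    rcases pvCombos_mem.mp hp with ⟨hsub, hlen⟩
    match p, hlen with
    | [a, b], _ =>
      have hdvd : k ∣ (a + b) := by
        have := (PySem.Int.mod_eq_zero_iff_dvd ([a,b].sum) k).mp (by simpa using hps)
        simpa using this
      have hax : a ∈ x := hsub.subset (by simp)
      have hbx : b ∈ x := hsub.subset (by simp)
      have hsb : f b = PySem.Int.mod (-(f a)) k := by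
        rw [hf]
        rw [pvMod_eq_iff_dvd hk]
        have : b - -(PySem.Int.mod a k) = (a + b) - (a - PySem.Int.mod a k) := by ring
        rw [this]
        exact dvd_sub hdvd (pvMod_sub_dvd a k)
      refine ⟨f a, List.mem_map_of_mem hax, ?_⟩
      unfold pvBadRes
      by_cases hcase : PySem.Int.mod (-(f a)) k = f a
      · have hcount : 2 ≤ rs.count (f a) := by
          have hmap : ([f a, f b] : List Int).Sublist rs := by
            have := hsub.map f
            simpa [hrs] using this
          have : ([f a, f b] : List Int).count (f a) ≤ rs.count (f a) :=
            hmap.count_le (f a)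
          have hfb : f b = f a := by rw [hsb, hcase]
          simp [hfb, List.count_cons] at this ⊢
          omega
        simp [hcase, hcount]
      · have : f b ∈ rs := List.mem_map_of_mem hbx
        rw [hsb] at this
        simp [hcase, this]
  · rintro ⟨r, hr, hbad⟩
    unfold pvBadRes at hbad
    simp only [Bool.or_eq_true, Bool.and_eq_true, beq_iff_eq, bne_iff_ne, ne_eq,
      decide_eq_true_eq, List.contains_eq_mem, List.mem_map] at hbad
    rcases hbad with ⟨hcase, hcount⟩ | ⟨hcase, hmem⟩
    · -- residue r meets itself: two elements of residue r
      rcases pvPair_of_count (f := f) (by simpa [hrs] using hcount) with ⟨a, b, hs, hfa, hfb⟩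
      refine ⟨[a, b], pvCombos_mem.mpr ⟨hs, rfl⟩, ?_⟩
      have ha : PySem.Int.mod a k = r := by simpa [hf] using hfa
      have hb : PySem.Int.mod b k = PySem.Int.mod (-r) k := by
        rw [hcase]; simpa [hf] using hfb
      have hdvd := pvDvd_of_res hk ha hb
      simp [PySem.Int.mod_eq_zero_iff_dvd]
      exact hdvd
    · -- residue r meets a different residue s = (-r) % k
      rw [hrs] at hmem
      rcases List.mem_map.mp hmem with ⟨b, hbx, hfb⟩
      rcases List.mem_map.mp (by rw [hrs] at hr; exact hr) with ⟨a, hax, hfa⟩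
      have ha : PySem.Int.mod a k = r := by simpa [hf] using hfa
      have hb : PySem.Int.mod b k = PySem.Int.mod (-r) k := by simpa [hf] using hfb
      have hfne : f a ≠ f b := by
        simp only [hf]
        rw [ha, hb]
        exact fun h => hcase h.symm
      have hdvd := pvDvd_of_res hk ha hb
      rcases pvPair_of_two (f := f) hax hbx hfne with ⟨u, v, huv⟩
      have hsum : ∃ hs : ([u, v] : List Int).Sublist x, u + v = a + b := by
        rcases huv with ⟨hs, h2, _⟩ | ⟨hs, h2, _⟩ <;> exact ⟨hs, h2⟩
      rcases hsum with ⟨hs, h2⟩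
      refine ⟨[u, v], pvCombos_mem.mpr ⟨hs, rfl⟩, ?_⟩
      simp [PySem.Int.mod_eq_zero_iff_dvd, h2]
      exact hdvd

-- the filter predicates agree on subsets of size ≥ 2 (k ≠ 0)
theorem pvCond_eq (k : Int) (hk : k ≠ 0) {i : Nat} (hi : 2 ≤ i) {array x : List Int}
    (hx : x ∈ pvCombos i array) :
    (decide (1 < x.length) && !((pvCombos 2 x).any (fun p => PySem.Int.mod p.sum k == 0))) =
    ((x.map (fun v => PySem.Int.mod v k)).all
      (fun r => !pvBadRes k (x.map (fun v => PySem.Int.mod v k)) r)) := by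
  have hlen : x.length = i := pvCombos_length hx
  have h1 : 1 < x.length := by omega
  rw [pvAny_iff k hk x]
  simp [h1, List.all_eq_not_any_not]

-- filter distributes over flatten-of-map
theorem pvFilter_flatten (p : List Int → Bool) (L : List (List (List Int))) :
    L.flatten.filter p = (L.map (fun l => l.filter p)).flatten := by
  induction L with
  | nil => rfl
  | cons l L ih => simp [List.filter_append, ih]

-- size-0 and size-1 subsets are filtered away by A's length test
theorem pvSmall_nil (k : Int) (array : List Int) {i : Nat} (hi : i ≤ 1) :
    (pvCombos i array).filter (fun x =>
      decide (1 < x.length) && !((pvCombos 2 x).any (fun p => PySem.Int.mod p.sum k == 0))) = [] := by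
  apply List.filter_eq_nil_iff.mpr
  intro x hx
  have := pvCombos_length hx
  simp [show ¬(1 < x.length) by omega]

-- ===== VERDICT (by name: the statement is the Claim_ definition above) =====
theorem none_devisible_calculator_spec : Claim_equal_none_devisible_calculator := by
  intro array k _ hpre
  unfold Spec_none_devisible_calculator
  unfold none_devisible_calculator none_devisible_calculator_alt pvSubsetCreator
  rw [pvLoopA_eq_filter, pvFilter_flatten, List.map_map]
  cases array with
  | nil =>
      simp [List.range_eq_range', List.range'_succ, pvSmall_nil]
  | cons a as => cases as with
    | nil =>
        simp [List.range_eq_range', List.range'_succ, pvSmall_nil]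
    | cons b rest =>
        have hk : k ≠ 0 := by
          rcases hpre with h | h
          · exact h
          · simp at h
        have hrange : List.range ((a :: b :: rest).length + 1) =
            0 :: 1 :: List.range' 2 (rest.length + 1) := by
          simp [List.range_eq_range', List.range'_succ]
        rw [hrange]
        simp only [List.map_cons, List.flatten_cons, Function.comp]
        rw [pvSmall_nil k _ (by omega), pvSmall_nil k _ (by omega)]
        simp only [List.nil_append, List.flatMap_def]
        have hlen : (a :: b :: rest).length - 1 = rest.length + 1 := by simp
        rw [hlen]
        congr 1
        apply List.map_congr_left
        intro i hi
        have h2 : 2 ≤ i := (List.mem_range'_1.mp hi).1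
        apply List.filter_congr
        intro x hx
        exact pvCond_eq k hk h2 hx
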